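-- pv_equiv track=rewrite | github.com/DJMcClellan1966/next | knuth_algorithms.py | generate_combinations_lexicographic
-- ===== SOURCE A (Python) =====
-- from typing import List, Dict, Tuple, Any, Optional, Union, Iterator
--
-- def generate_combinations_lexicographic(
--     items: List[Any],
--     k: int
-- ) -> Iterator[List[Any]]:
--     """
--     Generate k-combinations - Algorithm T (Vol. 4)
--
--     Generates combinations in lexicographic order
--
--     Args:
--         items: List of items
--         k: Combination size
--
--     Yields:
--         Combinations
--     """
--     n = len(items)
--     if k > n:
--         return
--
--     # Initialize: first combination is [0, 1, ..., k-1]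
--     c = list(range(k))
--     yield [items[i] for i in c]
--
--     while True:
--         # Find largest j such that c[j] < n - k + j
--         j = k - 1
--         while j >= 0 and c[j] >= n - k + j:
--             j -= 1
--
--         if j < 0:
--             break  # No more combinations
--
--         # Increment c[j]
--         c[j] += 1
--
--         # Set c[j+1..k-1] to consecutive values
--         for i in range(j + 1, k):
--             c[i] = c[i-1] + 1
--
--         yield [items[i] for i in c]
-- ===== SOURCE B (Python) =====
-- def generate_combinations_lexicographic(items, k):
--     """Recursive prefix-extension generator: same lexicographic order as A."""
--     n = len(items)
--     if k > n:
--         return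
--     if k <= 0:
--         yield []
--         return
--
--     def rec(start, chosen):
--         if len(chosen) == k:
--             yield list(chosen)
--         else:
--             for i in range(start, n):
--                 yield from rec(i + 1, chosen + [items[i]])
--
--     yield from rec(0, [])
-- ===== Notes on version B (the rewrite author's own statement) =====
-- stated objective: alternative
-- what changed: Replaces Knuth's iterative in-place successor loop (Algorithm T) with a recursive prefix-extension generator that extends a chosen prefix with each feasible next index.
import Mathlib
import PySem

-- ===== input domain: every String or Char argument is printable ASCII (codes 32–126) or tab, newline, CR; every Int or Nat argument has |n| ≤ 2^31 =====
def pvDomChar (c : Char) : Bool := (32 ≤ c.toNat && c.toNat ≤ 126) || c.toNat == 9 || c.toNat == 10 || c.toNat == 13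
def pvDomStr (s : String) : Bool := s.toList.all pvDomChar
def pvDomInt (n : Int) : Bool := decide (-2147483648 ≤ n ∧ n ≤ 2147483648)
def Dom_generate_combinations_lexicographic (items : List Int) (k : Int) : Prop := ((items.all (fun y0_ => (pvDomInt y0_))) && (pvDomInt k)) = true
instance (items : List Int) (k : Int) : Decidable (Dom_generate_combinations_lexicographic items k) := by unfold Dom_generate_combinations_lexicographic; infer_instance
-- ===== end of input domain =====

-- B replaces Knuth's iterative in-place successor loop by a recursive prefix-extension
-- generator (alternative decomposition, same outputs and order).

-- ===== PORT A =====
-- inner `while j >= 0 and c[j] >= n - k + j: j -= 1` (indices are always in range when read)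
def pvFindJ (n k : Int) (c : List Int) (j : Int) : Int :=
  if h : 0 ≤ j ∧ PySem.List.pyGetD c j 0 ≥ n - k + j then pvFindJ n k c (j - 1) else j
termination_by (j + 1).toNat
decreasing_by omega

-- `[items[i] for i in c]` (i always in range when evaluated)
def pvYield (items : List Int) (c : List Int) : List Int :=
  c.map (fun i => PySem.List.pyGetD items i 0)

-- the `while True` loop; fuel is only a totality guard (proved sufficient below)
def pvLoop (items : List Int) (n k : Int) : Nat → List Int → List (List Int)
  | 0, _ => []
  | fuel + 1, c =>
    let j := pvFindJ n k c (k - 1)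
    if j < 0 then []
    else
      let c1 := PySem.List.pySetD c j (PySem.List.pyGetD c j 0 + 1)
      let c2 := (PySem.List.pyRange (j + 1) k 1).foldl
        (fun cc i => PySem.List.pySetD cc i (PySem.List.pyGetD cc (i - 1) 0 + 1)) c1
      pvYield items c2 :: pvLoop items n k fuel c2

def generate_combinations_lexicographic (items : List Int) (k : Int) : List (List Int) :=
  let n : Int := items.length
  if k > n then []
  else
    let c := PySem.List.pyRange 0 k 1
    pvYield items c :: pvLoop items n k ((items.length + 1) ^ k.toNat) c

-- ===== PORT B =====
-- `rec(start, chosen)`; Python tests len(chosen) == k, equal to k ≤ len under the call invariant len ≤ k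
def pvRec (items : List Int) (k : Int) (start : Int) (chosen : List Int) : List (List Int) :=
  if k ≤ (chosen.length : Int) then [chosen]
  else (PySem.List.pyRange start (items.length : Int) 1).flatMap
        (fun i => pvRec items k (i + 1) (chosen ++ [PySem.List.pyGetD items i 0]))
termination_by k.toNat - chosen.length
decreasing_by simp only [List.length_append, List.length_cons, List.length_nil]; omega

def generate_combinations_lexicographic_alt (items : List Int) (k : Int) : List (List Int) :=
  if k > (items.length : Int) then []
  else if k ≤ 0 then [[]]
  else pvRec items k 0 []

-- ===== PRECONDITION & SPEC =====
def Spec_generate_combinations_lexicographic (items : List Int) (k : Int) (out : List (List Int)) : Prop := out = generate_combinations_lexicographic_alt items k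
instance (items : List Int) (k : Int) (out : List (List Int)) : Decidable (Spec_generate_combinations_lexicographic items k out) := by unfold Spec_generate_combinations_lexicographic; infer_instance

-- ===== CLAIM (what is proved, stated in full; the proofs are below) =====
def Claim_equal_generate_combinations_lexicographic : Prop := ∀ (items : List Int) (k : Int), Dom_generate_combinations_lexicographic items k → Spec_generate_combinations_lexicographic items k (generate_combinations_lexicographic items k)

-- ===== LEMMAS AND PROOFS =====

-- item at a Nat index
def pvItm (items : List Int) (i : Nat) : Int := items.getD i 0

-- all strictly increasing r-element index lists over [s, n), in lexicographic order
def pvCombos (n : Nat) : Nat → Nat → List (List Nat)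
  | 0, _ => [[]]
  | r + 1, s => (List.range' s (n - s)).flatMap (fun i => (pvCombos n r (i + 1)).map (i :: ·))

-- all valid index lists ≥ c in lexicographic order
def pvCombosFrom (n : Nat) : List Nat → List (List Nat)
  | [] => [[]]
  | c0 :: ct => ((pvCombosFrom n ct).map (c0 :: ·)) ++
      (List.range' (c0 + 1) (n - ct.length - 1 - c0)).flatMap
        (fun i => (pvCombos n ct.length (i + 1)).map (i :: ·))

def pvValid (n : Nat) (c : List Nat) : Prop := c.Pairwise (· < ·) ∧ ∀ x ∈ c, x < n

-- abstract version of the inner while loop: largest j ≤ j0 with c[j] + k < n + j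
def pvScan (n k : Nat) (c : List Nat) : Nat → Option Nat
  | 0 => if c.getD 0 0 + k < n then some 0 else none
  | j + 1 => if c.getD (j + 1) 0 + k < n + (j + 1) then some (j + 1) else pvScan n k c j

-- abstract successor: bump position j, make the tail consecutive
def pvSuccAt (c : List Nat) (j : Nat) : List Nat :=
  c.take j ++ List.range' (c.getD j 0 + 1) (c.length - j)

lemma pv_getD_map_cast (d : List Nat) (t : Nat) :
    (d.map (fun i : Nat => (i : Int))).getD t 0 = ((d.getD t 0 : Nat) : Int) := by
  rcases h : d[t]? with _ | x <;>
    simp [List.getD_eq_getElem?_getD, List.getElem?_map, h]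

lemma pv_range_cast (a b : Nat) :
    PySem.List.pyRange (a : Int) (b : Int) 1 = (List.range' a (b - a)).map (fun i : Nat => (i : Int)) := by
  rw [PySem.List.pyRange_one, List.range'_eq_map_range]
  have h : ((b : Int) - (a : Int)).toNat = b - a := by omega
  rw [h, List.map_map]
  exact List.map_congr_left fun x _ => by simp

lemma pv_succAt_cons (c0 : Nat) (ct : List Nat) (j : Nat) :
    pvSuccAt (c0 :: ct) (j + 1) = c0 :: pvSuccAt ct j := by
  simp [pvSuccAt, List.getD_cons_succ]

lemma pv_succAt_length (c : List Nat) (j : Nat) (h : j ≤ c.length) :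
    (pvSuccAt c j).length = c.length := by
  simp [pvSuccAt]; omega

lemma pv_bnd {n : Nat} : ∀ {c : List Nat}, pvValid n c →
    ∀ j, j < c.length → c.getD j 0 + (c.length - j) ≤ n := by
  intro c
  induction c with
  | nil => intro _ j hj; simp at hj
  | cons c0 ct ih =>
    intro hv j hj
    have hvt : pvValid n ct := ⟨hv.1.of_cons, fun x hx => hv.2 x (List.mem_cons_of_mem _ hx)⟩
    cases j with
    | zero =>
      rcases ct with _ | ⟨c1, ct'⟩
      · have := hv.2 c0 (by simp)
        simpa using this
      · have h1 := ih hvt 0 (by simp)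
        have h2 : c0 < c1 := List.rel_of_pairwise_cons hv.1 (by simp)
        simp only [List.getD_cons_zero] at h1 ⊢
        simp only [List.length_cons] at h1 ⊢
        omega
    | succ j =>
      have h1 := ih hvt j (by simpa using hj)
      simp only [List.getD_cons_succ, List.length_cons]
      omega

lemma pv_scan_some {n k : Nat} {c : List Nat} : ∀ {j0 j : Nat}, pvScan n k c j0 = some j →
    j ≤ j0 ∧ c.getD j 0 + k < n + j := by
  intro j0
  induction j0 with
  | zero =>
    intro j h
    rw [show pvScan n k c 0 = if c.getD 0 0 + k < n then some 0 else none from rfl] at h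
    split_ifs at h with hc
    cases h; exact ⟨le_refl _, by omega⟩
  | succ j0 ih =>
    intro j h
    rw [show pvScan n k c (j0 + 1) = if c.getD (j0 + 1) 0 + k < n + (j0 + 1) then some (j0 + 1)
          else pvScan n k c j0 from rfl] at h
    split_ifs at h with hc
    · cases h; exact ⟨le_refl _, hc⟩
    · have := ih h; exact ⟨by omega, this.2⟩

lemma pv_scan_none {n k : Nat} {c : List Nat} : ∀ {j0 : Nat}, pvScan n k c j0 = none →
    ∀ j, j ≤ j0 → n + j ≤ c.getD j 0 + k := by
  intro j0
  induction j0 with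
  | zero =>
    intro h j hj
    rw [show pvScan n k c 0 = if c.getD 0 0 + k < n then some 0 else none from rfl] at h
    split_ifs at h with hc
    interval_cases j
    omega
  | succ j0 ih =>
    intro h j hj
    rw [show pvScan n k c (j0 + 1) = if c.getD (j0 + 1) 0 + k < n + (j0 + 1) then some (j0 + 1)
          else pvScan n k c j0 from rfl] at h
    split_ifs at h with hc
    rcases Nat.lt_or_ge j (j0 + 1) with h' | h'
    · exact ih h j (by omega)
    · have : j = j0 + 1 := by omega
      subst this; omega

lemma pv_scan_cons (n k : Nat) (c0 : Nat) (ct : List Nat) : ∀ j : Nat,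
    pvScan n (k + 1) (c0 :: ct) (j + 1) =
      (match pvScan n k ct j with
        | some j' => some (j' + 1)
        | none => if c0 + (k + 1) < n then some 0 else none) := by
  intro j
  induction j with
  | zero =>
    rw [show pvScan n (k + 1) (c0 :: ct) 1 =
          if (c0 :: ct).getD 1 0 + (k + 1) < n + 1 then some 1
          else pvScan n (k + 1) (c0 :: ct) 0 from rfl,
        show pvScan n (k + 1) (c0 :: ct) 0 =
          if (c0 :: ct).getD 0 0 + (k + 1) < n then some 0 else none from rfl,
        show pvScan n k ct 0 = if ct.getD 0 0 + k < n then some 0 else none from rfl,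
        List.getD_cons_succ, List.getD_cons_zero]
    by_cases hc : ct.getD 0 0 + k < n
    · rw [if_pos (by omega), if_pos hc]
    · rw [if_neg (by omega), if_neg hc]
  | succ j ih =>
    rw [show pvScan n (k + 1) (c0 :: ct) (j + 1 + 1) =
          if (c0 :: ct).getD (j + 1 + 1) 0 + (k + 1) < n + (j + 1 + 1) then some (j + 1 + 1)
          else pvScan n (k + 1) (c0 :: ct) (j + 1) from rfl,
        show pvScan n k ct (j + 1) =
          if ct.getD (j + 1) 0 + k < n + (j + 1) then some (j + 1) else pvScan n k ct j from rfl,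
        List.getD_cons_succ]
    by_cases hc : ct.getD (j + 1) 0 + k < n + (j + 1)
    · rw [if_pos (by omega), if_pos hc]
    · rw [if_neg (by omega), if_neg hc, ih]

lemma pv_headF (n : Nat) : ∀ c : List Nat, ∃ t, pvCombosFrom n c = c :: t := by
  intro c
  induction c with
  | nil => exact ⟨[], rfl⟩
  | cons c0 ct ih =>
    obtain ⟨t, ht⟩ := ih
    refine ⟨(t.map (c0 :: ·)) ++ (List.range' (c0 + 1) (n - ct.length - 1 - c0)).flatMap
      (fun i => (pvCombos n ct.length (i + 1)).map (i :: ·)), ?_⟩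
    show ((pvCombosFrom n ct).map (c0 :: ·)) ++ _ = _
    rw [ht]
    simp

lemma pv_cempty (n : Nat) : ∀ r s, n < s + r + 1 → pvCombos n (r + 1) s = [] := by
  intro r
  induction r with
  | zero =>
    intro s h
    simp [pvCombos, Nat.sub_eq_zero_of_le (by omega : n ≤ s)]
  | succ r ih =>
    intro s h
    rw [show pvCombos n (r + 1 + 1) s = (List.range' s (n - s)).flatMap
          (fun i => (pvCombos n (r + 1) (i + 1)).map (i :: ·)) from rfl,
        List.flatMap_eq_nil_iff]
    intro i hi
    have := List.mem_range'_1.mp hi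
    rw [ih (i + 1) (by omega), List.map_nil]

lemma pv_cfull (n : Nat) : ∀ r s, s + r ≤ n → pvCombosFrom n (List.range' s r) = pvCombos n r s := by
  intro r
  induction r with
  | zero => intro s _; simp [pvCombosFrom, pvCombos]
  | succ r ih =>
    intro s h
    rw [List.range'_succ]
    show ((pvCombosFrom n (List.range' (s + 1) r)).map (s :: ·)) ++
        (List.range' (s + 1) (n - (List.range' (s + 1) r).length - 1 - s)).flatMap
          (fun i => (pvCombos n (List.range' (s + 1) r).length (i + 1)).map (i :: ·)) = _
    rw [List.length_range', ih (s + 1) (by omega)]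
    have hns : n - s = (n - r - 1 - s) + 1 + r := by omega
    rw [show pvCombos n (r + 1) s = (List.range' s (n - s)).flatMap
          (fun i => (pvCombos n r (i + 1)).map (i :: ·)) from rfl]
    rw [hns, show (n - r - 1 - s) + 1 + r = ((n - r - 1 - s) + 1) + r from rfl,
        ← List.range'_append_1, List.flatMap_append,
        show List.range' s ((n - r - 1 - s) + 1) = s :: List.range' (s + 1) (n - r - 1 - s) from
          by rw [List.range'_succ]]
    have hz : (List.range' (s + ((n - r - 1 - s) + 1)) r).flatMap
        (fun i => (pvCombos n r (i + 1)).map (i :: ·)) = [] := by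
      rw [List.flatMap_eq_nil_iff]
      intro i hi
      have hmi := List.mem_range'_1.mp hi
      rcases r with _ | r'
      · simp at hi
      · rw [pv_cempty n r' (i + 1) (by omega), List.map_nil]
    rw [hz, List.append_nil, List.flatMap_cons]

lemma pv_last (n : Nat) : ∀ r, r ≤ n → pvCombosFrom n (List.range' (n - r) r) = [List.range' (n - r) r] := by
  intro r
  induction r with
  | zero => simp [pvCombosFrom]
  | succ r ih =>
    intro h
    have h1 : List.range' (n - (r + 1)) (r + 1) = (n - r - 1) :: List.range' (n - r) r := by
      rw [show n - (r + 1) = n - r - 1 from by omega, List.range'_succ,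
          show n - r - 1 + 1 = n - r from by omega]
    rw [h1]
    show ((pvCombosFrom n (List.range' (n - r) r)).map ((n - r - 1) :: ·)) ++
        (List.range' ((n - r - 1) + 1) (n - (List.range' (n - r) r).length - 1 - (n - r - 1))).flatMap
          (fun i => (pvCombos n (List.range' (n - r) r).length (i + 1)).map (i :: ·)) = _
    rw [List.length_range', show n - r - 1 - (n - r - 1) = 0 from by omega]
    rw [ih (by omega)]
    simp

lemma pv_lenC (n : Nat) : ∀ r s, (pvCombos n r s).length ≤ (n + 1) ^ r := by
  intro r
  induction r with
  | zero => intro s; simp [pvCombos]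
  | succ r ih =>
    intro s
    rw [show pvCombos n (r + 1) s = (List.range' s (n - s)).flatMap
          (fun i => (pvCombos n r (i + 1)).map (i :: ·)) from rfl, List.length_flatMap]
    calc ((List.range' s (n - s)).map (fun i => ((pvCombos n r (i + 1)).map (i :: ·)).length)).sum
        ≤ ((List.range' s (n - s)).map (fun i => ((pvCombos n r (i + 1)).map (i :: ·)).length)).length • ((n + 1) ^ r) := by
          apply List.sum_le_card_nsmul
          intro x hx
          obtain ⟨i, _, rfl⟩ := List.mem_map.mp hx
          simpa using ih (i + 1)
      _ = (n - s) * (n + 1) ^ r := by simp [smul_eq_mul]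
      _ ≤ (n + 1) ^ r * (n + 1) := by
          rw [Nat.mul_comm]
          exact Nat.mul_le_mul_left _ (by omega)
      _ = (n + 1) ^ (r + 1) := (pow_succ _ _).symm

lemma pv_lenF (n : Nat) : ∀ c : List Nat, (pvCombosFrom n c).length ≤ (n + 1) ^ c.length := by
  intro c
  induction c with
  | nil => simp [pvCombosFrom]
  | cons c0 ct ih =>
    rw [show pvCombosFrom n (c0 :: ct) = ((pvCombosFrom n ct).map (c0 :: ·)) ++
        (List.range' (c0 + 1) (n - ct.length - 1 - c0)).flatMap
          (fun i => (pvCombos n ct.length (i + 1)).map (i :: ·)) from rfl]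
    rw [List.length_append, List.length_map, List.length_flatMap]
    have h2 : ((List.range' (c0 + 1) (n - ct.length - 1 - c0)).map
        (fun i => ((pvCombos n ct.length (i + 1)).map (i :: ·)).length)).sum ≤ ((n + 1) ^ ct.length) * n := by
      calc _ ≤ ((List.range' (c0 + 1) (n - ct.length - 1 - c0)).map
            (fun i => ((pvCombos n ct.length (i + 1)).map (i :: ·)).length)).length • ((n + 1) ^ ct.length) := by
              apply List.sum_le_card_nsmul
              intro x hx
              obtain ⟨i, _, rfl⟩ := List.mem_map.mp hx
              simpa using pv_lenC n ct.length (i + 1)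
        _ = (n - ct.length - 1 - c0) * (n + 1) ^ ct.length := by simp [smul_eq_mul]
        _ ≤ ((n + 1) ^ ct.length) * n := by
              rw [Nat.mul_comm]
              exact Nat.mul_le_mul_left _ (by omega)
    have h3 : (n + 1) ^ (c0 :: ct).length = (n + 1) ^ ct.length + ((n + 1) ^ ct.length) * n := by
      simp [List.length_cons, pow_succ]; ring
    omega

lemma pv_succ (n : Nat) : ∀ (c : List Nat) (j : Nat), pvValid n c → c ≠ [] → c.length ≤ n →
    pvScan n c.length c (c.length - 1) = some j →
    pvCombosFrom n c = c :: pvCombosFrom n (pvSuccAt c j) ∧ pvValid n (pvSuccAt c j) := by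
  intro c
  induction c with
  | nil => intro j _ hne; exact absurd rfl hne
  | cons c0 ct ih =>
    intro j hv _ hn hs
    have hvt : pvValid n ct := ⟨hv.1.of_cons, fun x hx => hv.2 x (List.mem_cons_of_mem _ hx)⟩
    rcases ct with _ | ⟨c1, ct'⟩
    · -- singleton case
      simp only [List.length_cons, List.length_nil] at hs
      rw [show pvScan n (0 + 1) [c0] (0 + 1 - 1) =
            if ([c0] : List Nat).getD 0 0 + (0 + 1) < n then some 0 else none from rfl,
          List.getD_cons_zero] at hs
      split_ifs at hs with hc
      cases hs
      have hsa : pvSuccAt [c0] 0 = [c0 + 1] := by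
        simp [pvSuccAt, List.range'_one]
      rw [hsa]
      constructor
      · show ((pvCombosFrom n []).map (c0 :: ·)) ++
            (List.range' (c0 + 1) (n - List.length ([] : List Nat) - 1 - c0)).flatMap
              (fun i => (pvCombos n (List.length ([] : List Nat)) (i + 1)).map (i :: ·)) = _
        show ([[c0]] : List (List Nat)) ++ (List.range' (c0 + 1) (n - 0 - 1 - c0)).flatMap
              (fun i => ([[]] : List (List Nat)).map (i :: ·)) = _
        have hm : n - 0 - 1 - c0 = (n - 2 - c0) + 1 := by omega
        rw [hm, List.range'_succ, List.flatMap_cons]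
        show _ = [c0] :: (((pvCombosFrom n []).map ((c0 + 1) :: ·)) ++
            (List.range' (c0 + 1 + 1) (n - List.length ([] : List Nat) - 1 - (c0 + 1))).flatMap
              (fun i => (pvCombos n (List.length ([] : List Nat)) (i + 1)).map (i :: ·)))
        show _ = [c0] :: (([[c0 + 1]] : List (List Nat)) ++
            (List.range' (c0 + 2) (n - 0 - 1 - (c0 + 1))).flatMap
              (fun i => ([[]] : List (List Nat)).map (i :: ·)))
        rw [show n - 0 - 1 - (c0 + 1) = n - 2 - c0 from by omega]
        simp
      · exact ⟨List.pairwise_singleton _ _, by intro x hx; simp at hx; omega⟩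
    · -- ct = c1 :: ct'
      set ct := c1 :: ct' with hct
      have hlt : ct.length = ct'.length + 1 := by simp [hct]
      simp only [List.length_cons] at hs
      rw [hlt] at hs
      simp only [Nat.add_sub_cancel] at hs
      rw [pv_scan_cons n (ct'.length + 1) c0 ct ct'.length] at hs
      rcases hinner : pvScan n (ct'.length + 1) ct ct'.length with _ | j'
      · -- ct is the last combination; j = 0
        rw [hinner] at hs
        simp only at hs
        split_ifs at hs with hc
        cases hs
        have hbd := pv_bnd hvt
        have hnone := pv_scan_none (c := ct) (n := n) (k := ct'.length + 1) hinner
        have hctr : ct = List.range' (n - ct.length) ct.length := by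
          apply List.ext_getElem (by simp)
          intro jj h1 h2
          have e1 : n + jj ≤ ct.getD jj 0 + (ct'.length + 1) := hnone jj (by omega)
          have e2 : ct.getD jj 0 + (ct.length - jj) ≤ n := hbd jj h1
          rw [List.getD_eq_getElem ct 0 h1] at e1 e2
          rw [List.getElem_range'_1]
          omega
        have hLn : ct.length ≤ n := by omega
        constructor
        · show ((pvCombosFrom n ct).map (c0 :: ·)) ++
              (List.range' (c0 + 1) (n - ct.length - 1 - c0)).flatMap
                (fun i => (pvCombos n ct.length (i + 1)).map (i :: ·)) = _
          rw [hctr, pv_last n ct.length hLn, ← hctr]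
          have hm : n - ct.length - 1 - c0 = (n - ct.length - 2 - c0) + 1 := by
            simp only [hlt] at hc ⊢; omega
          rw [hm, List.range'_succ, List.flatMap_cons]
          have hsucc0 : pvSuccAt (c0 :: ct) 0 = (c0 + 1) :: List.range' (c0 + 2) ct.length := by
            simp [pvSuccAt, List.range'_succ]
          rw [hsucc0]
          show _ = (c0 :: ct) :: (((pvCombosFrom n (List.range' (c0 + 2) ct.length)).map ((c0 + 1) :: ·)) ++
              (List.range' (c0 + 1 + 1) (n - (List.range' (c0 + 2) ct.length).length - 1 - (c0 + 1))).flatMap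
                (fun i => (pvCombos n (List.range' (c0 + 2) ct.length).length (i + 1)).map (i :: ·)))
          rw [List.length_range', pv_cfull n ct.length (c0 + 2) (by simp only [hlt] at hc ⊢; omega)]
          rw [show n - ct.length - 1 - (c0 + 1) = n - ct.length - 2 - c0 from by omega]
          simp
        · constructor
          · have hsucc0 : pvSuccAt (c0 :: ct) 0 = List.range' (c0 + 1) (ct.length + 1) := by
              simp [pvSuccAt]
            rw [hsucc0]
            simpa using List.pairwise_lt_range' (s := c0 + 1) (n := ct.length + 1) (step := 1)
          · intro x hx
            simp only [pvSuccAt, List.take_zero, List.nil_append, List.length_cons,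
              List.getD_cons_zero, Nat.sub_zero] at hx
            have := List.mem_range'_1.mp hx
            simp only [hlt] at hc
            omega
      · -- ct has a successor at j'; j = j' + 1
        rw [hinner] at hs
        simp only at hs
        cases hs
        have hj' : j' < ct.length := by
          have := (pv_scan_some (c := ct) (n := n) (k := ct'.length + 1) hinner).1
          omega
        obtain ⟨hEq, hVal⟩ := ih j' hvt (by simp [hct])
          (by simp only [List.length_cons] at hn; omega)
          (by rw [hlt, Nat.add_sub_cancel]; exact hinner)
        have hslen : (pvSuccAt ct j').length = ct.length := pv_succAt_length ct j' (by omega)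
        have hmem_gt : ∀ x ∈ pvSuccAt ct j', c0 < x := by
          intro x hx
          simp only [pvSuccAt, List.mem_append] at hx
          rcases hx with hx | hx
          · exact List.rel_of_pairwise_cons hv.1 (List.mem_of_mem_take hx)
          · have h1 := List.mem_range'_1.mp hx
            have h2 : ct.getD j' 0 ∈ ct := by
              rw [List.getD_eq_getElem ct 0 hj']
              exact List.getElem_mem hj'
            have h3 := List.rel_of_pairwise_cons hv.1 h2
            omega
        constructor
        · rw [pv_succAt_cons]
          show ((pvCombosFrom n ct).map (c0 :: ·)) ++
              (List.range' (c0 + 1) (n - ct.length - 1 - c0)).flatMap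
                (fun i => (pvCombos n ct.length (i + 1)).map (i :: ·)) = _
          rw [hEq]
          show _ = (c0 :: ct) :: (((pvCombosFrom n (pvSuccAt ct j')).map (c0 :: ·)) ++
              (List.range' (c0 + 1) (n - (pvSuccAt ct j').length - 1 - c0)).flatMap
                (fun i => (pvCombos n (pvSuccAt ct j').length (i + 1)).map (i :: ·)))
          rw [hslen]
          simp
        · rw [pv_succAt_cons]
          refine ⟨List.pairwise_cons.mpr ⟨hmem_gt, hVal.1⟩, ?_⟩
          intro x hx
          rcases List.mem_cons.mp hx with rfl | hx
          · exact hv.2 x (List.mem_cons_self)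
          · exact hVal.2 x hx

lemma pv_findJ_eq (n k : Nat) (c : List Nat) :
    ∀ j : Nat,
      pvFindJ (n : Int) (k : Int) (c.map (fun i : Nat => (i : Int))) (j : Int) =
        (match pvScan n k c j with | some j' => (j' : Int) | none => -1) := by
  intro j
  induction j with
  | zero =>
    rw [pvFindJ]
    rw [show ((0 : Nat) : Int) = (0 : Int) from rfl]
    rw [show PySem.List.pyGetD (c.map (fun i : Nat => (i : Int))) 0 0 =
          ((c.getD 0 0 : Nat) : Int) from by
        rw [show (0 : Int) = ((0 : Nat) : Int) from rfl, PySem.List.pyGetD_natCast]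
        exact pv_getD_map_cast c 0]
    by_cases hc : c.getD 0 0 + k < n
    · rw [dif_neg (by push_cast; omega)]
      rw [show pvScan n k c 0 = if c.getD 0 0 + k < n then some 0 else none from rfl, if_pos hc]
      rfl
    · rw [dif_pos ⟨by omega, by push_cast; omega⟩]
      rw [pvFindJ, dif_neg (by omega)]
      rw [show pvScan n k c 0 = if c.getD 0 0 + k < n then some 0 else none from rfl, if_neg hc]
      decide
  | succ j ih =>
    rw [pvFindJ]
    rw [show PySem.List.pyGetD (c.map (fun i : Nat => (i : Int))) ((j + 1 : Nat) : Int) 0 =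
          ((c.getD (j + 1) 0 : Nat) : Int) from by
        rw [PySem.List.pyGetD_natCast]
        exact pv_getD_map_cast c (j + 1)]
    by_cases hc : c.getD (j + 1) 0 + k < n + (j + 1)
    · rw [dif_neg (by push_cast; omega)]
      rw [show pvScan n k c (j + 1) = if c.getD (j + 1) 0 + k < n + (j + 1) then some (j + 1)
            else pvScan n k c j from rfl, if_pos hc]
    · rw [dif_pos ⟨by push_cast; omega, by push_cast; omega⟩]
      rw [show ((j + 1 : Nat) : Int) - 1 = ((j : Nat) : Int) from by push_cast; ring, ih]
      rw [show pvScan n k c (j + 1) = if c.getD (j + 1) 0 + k < n + (j + 1) then some (j + 1)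
            else pvScan n k c j from rfl, if_neg hc]

lemma pv_foldstep : ∀ (m i : Nat) (d : List Nat), 1 ≤ i → i + m ≤ d.length →
    (List.range' i m).foldl (fun dd t => dd.set t (dd.getD (t - 1) 0 + 1)) d
      = d.take i ++ List.range' (d.getD (i - 1) 0 + 1) m ++ d.drop (i + m) := by
  intro m
  induction m with
  | zero => intro i d _ _; simp
  | succ m ih =>
    intro i d hi hlen
    rw [List.range'_succ, List.foldl_cons]
    have hid : i < d.length := by omega
    have h1 := ih (i + 1) (d.set i (d.getD (i - 1) 0 + 1)) (by omega) (by simp; omega)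
    rw [h1]
    have hg : (d.set i (d.getD (i - 1) 0 + 1)).getD ((i + 1) - 1) 0 = d.getD (i - 1) 0 + 1 := by
      rw [show (i + 1) - 1 = i from rfl, List.getD_eq_getElem _ 0 (by simp; omega)]
      simp
    rw [hg]
    have ht : (d.set i (d.getD (i - 1) 0 + 1)).take (i + 1) = d.take i ++ [d.getD (i - 1) 0 + 1] := by
      rw [List.take_succ_eq_append_getElem (by simp; omega)]
      rw [List.take_set_of_le (le_refl i)]
      congr 1
      simp
    rw [ht, List.drop_set_of_lt (by omega : i < i + 1 + m)]
    rw [show List.range' (d.getD (i - 1) 0 + 1) (m + 1) =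
          (d.getD (i - 1) 0 + 1) :: List.range' (d.getD (i - 1) 0 + 1 + 1) m from by rw [List.range'_succ]]
    rw [show i + (m + 1) = i + 1 + m from by omega]
    simp [List.append_assoc]

lemma pv_fold_cast : ∀ (l : List Nat) (d : List Nat), (∀ i ∈ l, 1 ≤ i) →
    l.foldl (fun cc (i : Nat) =>
        PySem.List.pySetD cc ((i : Int)) (PySem.List.pyGetD cc ((i : Int) - 1) 0 + 1))
      (d.map (fun i : Nat => (i : Int)))
      = (l.foldl (fun dd t => dd.set t (dd.getD (t - 1) 0 + 1)) d).map (fun i : Nat => (i : Int)) := by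
  intro l
  induction l with
  | nil => intro d _; rfl
  | cons i l ih =>
    intro d hmem
    have hi : 1 ≤ i := hmem i (List.mem_cons_self)
    rw [List.foldl_cons, List.foldl_cons]
    rw [show ((i : Int)) - 1 = ((i - 1 : Nat) : Int) from by omega]
    rw [PySem.List.pyGetD_natCast, pv_getD_map_cast, PySem.List.pySetD_natCast]
    rw [show ((d.getD (i - 1) 0 : Nat) : Int) + 1 = ((d.getD (i - 1) 0 + 1 : Nat) : Int) from by push_cast; ring]
    rw [← List.map_set]
    exact ih _ (fun x hx => hmem x (List.mem_cons_of_mem _ hx))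

lemma pv_step_eq (n k : Nat) (c : List Nat) (j : Nat) (hlen : c.length = k) (hj : j < k) :
    ((PySem.List.pyRange ((j : Int) + 1) (k : Int) 1).foldl
        (fun cc i => PySem.List.pySetD cc i (PySem.List.pyGetD cc (i - 1) 0 + 1))
        (PySem.List.pySetD (c.map (fun i : Nat => (i : Int))) (j : Int)
          (PySem.List.pyGetD (c.map (fun i : Nat => (i : Int))) (j : Int) 0 + 1))) =
      (pvSuccAt c j).map (fun i : Nat => (i : Int)) := by
  have hstart : PySem.List.pySetD (c.map (fun i : Nat => (i : Int))) (j : Int)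
      (PySem.List.pyGetD (c.map (fun i : Nat => (i : Int))) (j : Int) 0 + 1)
      = (c.set j (c.getD j 0 + 1)).map (fun i : Nat => (i : Int)) := by
    rw [PySem.List.pyGetD_natCast, pv_getD_map_cast, PySem.List.pySetD_natCast]
    rw [show ((c.getD j 0 : Nat) : Int) + 1 = ((c.getD j 0 + 1 : Nat) : Int) from by push_cast; ring]
    rw [← List.map_set]
  rw [hstart]
  rw [show ((j : Int)) + 1 = ((j + 1 : Nat) : Int) from by push_cast; ring, pv_range_cast]
  rw [List.foldl_map]
  have hfc := pv_fold_cast (List.range' (j + 1) (k - (j + 1))) (c.set j (c.getD j 0 + 1))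
    (fun i hi => by have := List.mem_range'_1.mp hi; omega)
  rw [hfc]
  congr 1
  have hfs := pv_foldstep (k - (j + 1)) (j + 1) (c.set j (c.getD j 0 + 1)) (by omega) (by simp [hlen]; omega)
  rw [hfs]
  have hg : (c.set j (c.getD j 0 + 1)).getD ((j + 1) - 1) 0 = c.getD j 0 + 1 := by
    rw [show (j + 1) - 1 = j from rfl, List.getD_eq_getElem _ 0 (by simp [hlen]; omega)]
    simp
  rw [hg]
  have hd : (c.set j (c.getD j 0 + 1)).drop (j + 1 + (k - (j + 1))) = [] := by
    apply List.drop_eq_nil_of_le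
    simp [hlen]; omega
  rw [hd, List.append_nil]
  have ht : (c.set j (c.getD j 0 + 1)).take (j + 1) = c.take j ++ [c.getD j 0 + 1] := by
    rw [List.take_succ_eq_append_getElem (by simp [hlen]; omega)]
    rw [List.take_set_of_le (le_refl j)]
    congr 1
    simp
  rw [ht]
  rw [show pvSuccAt c j = c.take j ++ List.range' (c.getD j 0 + 1) (c.length - j) from rfl]
  rw [show c.length - j = (k - (j + 1)) + 1 from by omega]
  rw [List.range'_succ]
  simp [List.append_assoc]

lemma pv_yield_eq (items : List Int) (c : List Nat) :
    pvYield items (c.map (fun i : Nat => (i : Int))) = c.map (pvItm items) := by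
  simp only [pvYield, List.map_map]
  exact List.map_congr_left fun x _ => by
    simp [Function.comp, PySem.List.pyGetD_natCast, pvItm]

lemma pv_main (items : List Int) (k : Nat) (hk : 1 ≤ k) (hkn : k ≤ items.length) :
    ∀ (fuel : Nat) (c : List Nat), pvValid items.length c → c.length = k →
      (pvCombosFrom items.length c).length ≤ fuel + 1 →
      pvYield items (c.map (fun i : Nat => (i : Int))) ::
          pvLoop items ((items.length : Nat) : Int) ((k : Nat) : Int) fuel (c.map (fun i : Nat => (i : Int))) =
        (pvCombosFrom items.length c).map (fun d => d.map (pvItm items)) := by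
  intro fuel
  induction fuel with
  | zero =>
    intro c hv hlen hfuel
    rcases hscan : pvScan items.length k c (k - 1) with _ | j
    · -- last combination
      have hbd := pv_bnd hv
      have hnone := pv_scan_none hscan
      have hctr : c = List.range' (items.length - k) k := by
        apply List.ext_getElem (by simp [hlen])
        intro jj h1 h2
        have e1 : items.length + jj ≤ c.getD jj 0 + k := hnone jj (by rw [hlen] at h1; omega)
        have e2 := hbd jj h1
        rw [List.getD_eq_getElem c 0 h1] at e1 e2
        rw [List.getElem_range'_1]
        rw [hlen] at e2
        omega
      have hfin : pvCombosFrom items.length c = [c] := by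
        rw [hctr, pv_last items.length k hkn, ← hctr]
      rw [hfin]
      show [pvYield items (c.map (fun i : Nat => (i : Int)))] = [c.map (pvItm items)]
      rw [pv_yield_eq]
    · -- contradiction: at least two combinations remain but fuel = 0
      exfalso
      have hs' : pvScan items.length c.length c (c.length - 1) = some j := by rw [hlen]; exact hscan
      obtain ⟨hEq, hVal⟩ := pv_succ items.length c j hv (by intro h; rw [h] at hlen; simp at hlen; omega)
        (by omega) hs'
      obtain ⟨t, ht⟩ := pv_headF items.length (pvSuccAt c j)
      rw [hEq, ht] at hfuel
      simp at hfuel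
  | succ fuel ih =>
    intro c hv hlen hfuel
    rcases hscan : pvScan items.length k c (k - 1) with _ | j
    · -- last combination: identical to the fuel = 0 case
      have hbd := pv_bnd hv
      have hnone := pv_scan_none hscan
      have hctr : c = List.range' (items.length - k) k := by
        apply List.ext_getElem (by simp [hlen])
        intro jj h1 h2
        have e1 : items.length + jj ≤ c.getD jj 0 + k := hnone jj (by rw [hlen] at h1; omega)
        have e2 := hbd jj h1
        rw [List.getD_eq_getElem c 0 h1] at e1 e2
        rw [List.getElem_range'_1]
        rw [hlen] at e2
        omega
      have hfin : pvCombosFrom items.length c = [c] := by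
        rw [hctr, pv_last items.length k hkn, ← hctr]
      rw [hfin]
      have hj : pvFindJ ((items.length : Nat) : Int) ((k : Nat) : Int)
          (c.map (fun i : Nat => (i : Int))) (((k - 1 : Nat) : Nat) : Int) = -1 := by
        have h0 := pv_findJ_eq items.length k c (k - 1)
        rw [hscan] at h0
        exact h0
      rw [show pvLoop items ((items.length : Nat) : Int) ((k : Nat) : Int) (fuel + 1)
            (c.map (fun i : Nat => (i : Int))) = [] from by
        simp only [pvLoop]
        rw [show ((k : Nat) : Int) - 1 = ((k - 1 : Nat) : Int) from by omega, hj]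
        simp]
      rw [pv_yield_eq]
      rfl
    · -- step to the successor
      have hs' : pvScan items.length c.length c (c.length - 1) = some j := by rw [hlen]; exact hscan
      have hjk : j < k := by
        have := (pv_scan_some hscan).1
        omega
      obtain ⟨hEq, hVal⟩ := pv_succ items.length c j hv (by intro h; rw [h] at hlen; simp at hlen; omega)
        (by omega) hs'
      have hslen : (pvSuccAt c j).length = k := by
        rw [pv_succAt_length c j (by omega)]; exact hlen
      have hj : pvFindJ ((items.length : Nat) : Int) ((k : Nat) : Int)
          (c.map (fun i : Nat => (i : Int))) (((k - 1 : Nat) : Nat) : Int) = ((j : Nat) : Int) := by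
        have h0 := pv_findJ_eq items.length k c (k - 1)
        rw [hscan] at h0
        exact h0
      rw [hEq]
      rw [List.map_cons, ← pv_yield_eq items c]
      congr 1
      simp only [pvLoop]
      rw [show ((k : Nat) : Int) - 1 = ((k - 1 : Nat) : Int) from by omega, hj]
      rw [if_neg (by omega)]
      rw [pv_step_eq items.length k c j hlen hjk]
      apply ih (pvSuccAt c j) hVal hslen
      obtain ⟨t, ht⟩ := pv_headF items.length (pvSuccAt c j)
      rw [hEq] at hfuel
      simp at hfuel
      omega

lemma pv_loop_zero (items : List Int) (n k : Int) (hk : k ≤ 0) (c : List Int) :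
    ∀ fuel, pvLoop items n k fuel c = [] := by
  intro fuel
  cases fuel with
  | zero => rfl
  | succ fuel =>
    simp only [pvLoop]
    rw [show pvFindJ n k c (k - 1) = k - 1 from by rw [pvFindJ]; exact dif_neg (by omega)]
    rw [if_pos (by omega)]

lemma pv_brec (items : List Int) (k : Int) :
    ∀ (r : Nat) (s : Nat) (chosen : List Int), (chosen.length : Int) + (r : Int) = k →
      pvRec items k (s : Int) chosen =
        (pvCombos items.length r s).map (fun d => chosen ++ d.map (pvItm items)) := by
  intro r
  induction r with
  | zero =>
    intro s chosen hlen
    rw [pvRec, if_pos (by omega)]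
    show _ = [chosen ++ []]
    simp
  | succ r ih =>
    intro s chosen hlen
    rw [pvRec, if_neg (by push_cast at hlen ⊢; omega)]
    rw [pv_range_cast s items.length, List.flatMap_map]
    rw [show pvCombos items.length (r + 1) s = (List.range' s (items.length - s)).flatMap
          (fun i => (pvCombos items.length r (i + 1)).map (i :: ·)) from rfl]
    rw [List.map_flatMap]
    congr 1
    funext i
    rw [show ((i : Int)) + 1 = ((i + 1 : Nat) : Int) from by push_cast; ring,
        PySem.List.pyGetD_natCast]
    rw [ih (i + 1) (chosen ++ [items.getD i 0]) (by
      simp only [List.length_append, List.length_cons, List.length_nil]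
      push_cast at hlen ⊢
      omega)]
    rw [List.map_map]
    apply List.map_congr_left
    intro d _
    simp [pvItm, List.append_assoc]

-- ===== VERDICT (by name: the statement is the Claim_ definition above) =====
theorem generate_combinations_lexicographic_spec : Claim_equal_generate_combinations_lexicographic := by
  unfold Claim_equal_generate_combinations_lexicographic
  intro items k _
  unfold Spec_generate_combinations_lexicographic
  simp only [generate_combinations_lexicographic, generate_combinations_lexicographic_alt]
  by_cases h1 : k > (items.length : Int)
  · simp [h1]
  · rw [if_neg h1, if_neg h1]
    by_cases h2 : k ≤ 0
    · -- k ≤ 0: A yields the single empty combination, as B does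
      rw [if_pos h2]
      have hc : PySem.List.pyRange 0 k 1 = [] := PySem.List.pyRange_one_eq_nil (by omega)
      rw [hc]
      rw [pv_loop_zero items (items.length : Int) k h2 [] ((items.length + 1) ^ k.toNat)]
      rfl
    · -- 0 < k ≤ len items
      rw [if_neg h2]
      set K := k.toNat with hKdef
      have hK : (K : Int) = k := Int.toNat_of_nonneg (by omega)
      have hK1 : 1 ≤ K := by omega
      have hKn : K ≤ items.length := by omega
      have hc : PySem.List.pyRange 0 k 1 = (List.range' 0 K).map (fun i : Nat => (i : Int)) := by
        rw [show (0 : Int) = ((0 : Nat) : Int) from rfl, ← hK, pv_range_cast, Nat.sub_zero]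
      rw [hc, ← hK]
      have hvalid : pvValid items.length (List.range' 0 K) := by
        constructor
        · simpa using List.pairwise_lt_range' (s := 0) (n := K) (step := 1)
        · intro x hx
          have := List.mem_range'_1.mp hx
          omega
      have hlen : (List.range' 0 K).length = K := by simp
      have hfuel : (pvCombosFrom items.length (List.range' 0 K)).length ≤ (items.length + 1) ^ K + 1 := by
        have := pv_lenF items.length (List.range' 0 K)
        rw [hlen] at this
        omega
      rw [pv_main items K hK1 hKn ((items.length + 1) ^ K) (List.range' 0 K) hvalid hlen hfuel]
      rw [show (0 : Int) = ((0 : Nat) : Int) from rfl,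
          pv_brec items ((K : Nat) : Int) K 0 [] (by simp)]
      rw [pv_cfull items.length K 0 (by omega)]
      simp
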